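-- pv_equiv track=rewrite | github.com/Paul9inee/Elementary_Algorithm | 0x01/arrayDdak.py | solution
-- ===== SOURCE A (Python) =====
-- def solution(arr, divisor):
--     list = []
--     for x in arr:
--         if x % divisor == 0:
--             list.append(x)
--         elif len(list) == 0:
--             list.append(-1)
--             return list
--     return list
-- ===== SOURCE B (Python) =====
-- def solution(arr, divisor):
--     def divisible(xs):
--         # structural recursion: divisible elements of xs, in order
--         if not xs:
--             return []
--         rest = divisible(xs[1:])
--         return [xs[0]] + rest if xs[0] % divisor == 0 else rest
--
--     return [-1] if arr and arr[0] % divisor != 0 else divisible(arr)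
-- ===== Notes on version B (the rewrite author's own statement) =====
-- stated objective: simpler
-- what changed: Replaced A's iterative accumulator loop with its running emptiness flag and in-loop early return by a head-element guard (the [-1] case happens exactly when arr[0] is non-divisible) followed by a structural recursion that builds the divisible sublist front-to-back by consing.
import Mathlib
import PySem

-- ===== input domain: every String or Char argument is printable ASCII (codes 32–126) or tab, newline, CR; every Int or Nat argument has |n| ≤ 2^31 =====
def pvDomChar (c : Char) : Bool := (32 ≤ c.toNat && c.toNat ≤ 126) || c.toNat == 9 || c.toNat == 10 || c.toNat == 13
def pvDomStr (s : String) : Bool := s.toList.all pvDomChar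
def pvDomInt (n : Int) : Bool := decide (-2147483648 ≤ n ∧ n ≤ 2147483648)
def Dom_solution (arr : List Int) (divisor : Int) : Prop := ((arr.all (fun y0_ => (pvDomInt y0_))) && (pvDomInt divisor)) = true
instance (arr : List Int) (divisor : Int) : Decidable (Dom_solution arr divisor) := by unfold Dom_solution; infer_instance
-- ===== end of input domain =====

-- B replaces A's accumulator loop with its emptiness flag by a head-element guard
-- plus a structural recursion that conses the divisible elements (simpler).

-- ===== PORT A =====
-- the for-loop of A: state is the accumulated list `acc`
def solutionLoop (divisor : Int) (xs : List Int) (acc : List Int) : List Int :=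
  match xs with
  | [] => acc
  | x :: rest =>
    if PySem.Int.mod x divisor == 0 then solutionLoop divisor rest (acc ++ [x])
    else if acc.length == 0 then acc ++ [-1]
    else solutionLoop divisor rest acc

def solution (arr : List Int) (divisor : Int) : List Int :=
  solutionLoop divisor arr []

-- ===== PORT B =====
-- Source B's recursive helper `divisible`
def solutionDivisible (divisor : Int) (xs : List Int) : List Int :=
  match xs with
  | [] => []
  | h :: t =>
    let rest := solutionDivisible divisor t
    if PySem.Int.mod h divisor == 0 then h :: rest else rest

def solution_alt (arr : List Int) (divisor : Int) : List Int :=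
  match arr with
  | [] => solutionDivisible divisor arr
  | x :: _ =>
    if PySem.Int.mod x divisor != 0 then [-1]
    else solutionDivisible divisor arr

-- ===== PRECONDITION & SPEC =====
-- Pre_ excludes divisor = 0 with nonempty arr, on which Python's `%` raises ZeroDivisionError.
def Pre_solution (arr : List Int) (divisor : Int) : Prop := arr = [] ∨ divisor ≠ 0
instance (arr : List Int) (divisor : Int) : Decidable (Pre_solution arr divisor) := by unfold Pre_solution; infer_instance
def pvWitness_solution : List Int × Int := ([6, 4, 9], 3)

def Spec_solution (arr : List Int) (divisor : Int) (out : List Int) : Prop := out = solution_alt arr divisor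
instance (arr : List Int) (divisor : Int) (out : List Int) : Decidable (Spec_solution arr divisor out) := by unfold Spec_solution; infer_instance

-- ===== CLAIM (what is proved, stated in full; the proofs are below) =====
def Claim_equal_solution : Prop := ∀ (arr : List Int) (divisor : Int), Dom_solution arr divisor → Pre_solution arr divisor → Spec_solution arr divisor (solution arr divisor)

-- ===== LEMMAS AND PROOFS =====

-- once acc is nonempty, A's loop just appends every divisible element of the rest
theorem solutionLoop_ne_nil (divisor : Int) (xs acc : List Int) (h : acc ≠ []) :
    solutionLoop divisor xs acc = acc ++ solutionDivisible divisor xs := by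
  induction xs generalizing acc with
  | nil => simp [solutionLoop, solutionDivisible]
  | cons x rest ih =>
    simp only [solutionLoop, solutionDivisible]
    by_cases hx : PySem.Int.mod x divisor == 0
    · rw [if_pos hx, ih _ (by simp), if_pos hx]
      simp
    · rw [if_neg hx, if_neg (by simpa using h), ih _ h, if_neg hx]

-- ===== VERDICT (by name: the statement is the Claim_ definition above) =====
theorem solution_spec : Claim_equal_solution := by
  intro arr divisor _ _
  unfold Spec_solution solution solution_alt
  cases arr with
  | nil => simp [solutionLoop, solutionDivisible]
  | cons x rest =>
    simp only [solutionLoop]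
    by_cases hx : PySem.Int.mod x divisor == 0
    · rw [if_pos hx, solutionLoop_ne_nil _ _ _ (by simp),
        if_neg (by simp_all)]
      simp [solutionDivisible, hx]
    · rw [if_neg hx, if_pos (by simp), if_pos (by simp_all)]
      rfl
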